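-- pv_equiv track=rewrite | github.com/seok10code/bakjoon | 2775.py | room
-- ===== SOURCE A (Python) =====
-- def room(flo, unit):
--     apt = []
--     floor = []
--
--     for i in range(flo+1):
--         for j in range(unit):
--
--             if not apt:
--                 floor.append(j+1)
--             else:
--                 floor.append(sum(apt[-1][:j+1]))
--
--         apt.append(floor)
--         floor = []
--
--     return apt[flo][unit-1]
-- ===== SOURCE B (Python) =====
-- def room(flo, unit):
--     # One row at a time with a running prefix sum: O(flo*unit) instead of
--     # recomputing sum(row[:j+1]) for every j.
--     row = list(range(1, unit + 1))
--     for _ in range(flo):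
--         s = 0
--         nxt = []
--         for v in row:
--             s += v
--             nxt.append(s)
--         row = nxt
--     return row[-1]
-- ===== Notes on version B (the rewrite author's own statement) =====
-- stated objective: faster
-- what changed: B keeps only the current floor's row and builds the next row with a single running prefix sum, instead of storing all floors and recomputing sum(prev[:j+1]) from scratch for every unit.
import Mathlib
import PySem

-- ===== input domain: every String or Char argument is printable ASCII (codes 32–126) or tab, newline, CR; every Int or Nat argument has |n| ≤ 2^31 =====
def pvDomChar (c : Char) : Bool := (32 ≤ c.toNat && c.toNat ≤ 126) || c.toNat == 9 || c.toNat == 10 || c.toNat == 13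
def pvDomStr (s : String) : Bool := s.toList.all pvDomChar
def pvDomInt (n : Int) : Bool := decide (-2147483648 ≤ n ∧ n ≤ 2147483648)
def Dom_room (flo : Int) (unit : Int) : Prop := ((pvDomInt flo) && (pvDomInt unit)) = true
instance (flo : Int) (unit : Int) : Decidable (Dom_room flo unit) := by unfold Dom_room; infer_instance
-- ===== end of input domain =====

-- B replaces A's store-all-floors / re-slice-and-sum recomputation by a single running
-- prefix sum over one kept row (objective: faster, asymptotically).


-- ===== PORT A =====
def room (flo : Int) (unit : Int) : Int :=
  let apt : List (List Int) :=
    (PySem.List.pyRange 0 (flo+1) 1).foldl (fun apt _i =>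
      let floor : List Int :=
        (PySem.List.pyRange 0 unit 1).foldl (fun floor j =>
          if apt.isEmpty then
            floor ++ [j+1]
          else
            floor ++ [(PySem.List.slice ((PySem.List.pyGet? apt (-1)).getD []) none (some (j+1))).sum])
          []
      apt ++ [floor]) []
  (PySem.List.pyGet? ((PySem.List.pyGet? apt flo).getD []) (unit-1)).getD 0

-- ===== PORT B =====
def room_alt (flo : Int) (unit : Int) : Int :=
  let row0 : List Int := PySem.List.pyRange 1 (unit+1) 1
  let row : List Int :=
    (PySem.List.pyRange 0 flo 1).foldl (fun row _ =>
      (row.foldl (fun (p : Int × List Int) v => (p.1 + v, p.2 ++ [p.1 + v])) (0, [])).2)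
      row0
  (PySem.List.pyGet? row (-1)).getD 0

-- ===== PRECONDITION & SPEC =====
-- A raises IndexError when flo < 0 (apt[flo] on an empty/short apt) or unit < 1
-- (apt[flo][unit-1] on an empty/short row); Pre_ excludes exactly those inputs.
def Pre_room (flo : Int) (unit : Int) : Prop := 0 ≤ flo ∧ 1 ≤ unit
instance (flo : Int) (unit : Int) : Decidable (Pre_room flo unit) := by unfold Pre_room; infer_instance
def pvWitness_room : Int × Int := (2, 3)

def Spec_room (flo : Int) (unit : Int) (out : Int) : Prop := out = room_alt flo unit
instance (flo : Int) (unit : Int) (out : Int) : Decidable (Spec_room flo unit out) := by unfold Spec_room; infer_instance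

-- ===== CLAIM (what is proved, stated in full; the proofs are below) =====
def Claim_equal_room : Prop := ∀ (flo : Int) (unit : Int), Dom_room flo unit → Pre_room flo unit → Spec_room flo unit (room flo unit)

-- ===== LEMMAS AND PROOFS =====

-- B's inner loop (running prefix sum), as a function of one row.
def pscan (r : List Int) : List Int :=
  (r.foldl (fun (p : Int × List Int) v => (p.1 + v, p.2 ++ [p.1 + v])) (0, [])).2

-- the sequence of rows both programs compute: floor k of the building
def rowsFn (unit : Int) : Nat → List Int
  | 0 => PySem.List.pyRange 1 (unit+1) 1
  | k+1 => pscan (rowsFn unit k)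

theorem pscan_general (r : List Int) (s : Int) (acc : List Int) :
    (r.foldl (fun (p : Int × List Int) v => (p.1 + v, p.2 ++ [p.1 + v])) (s, acc)).2
      = acc ++ (List.range r.length).map (fun k => s + (r.take (k+1)).sum) := by
  induction r generalizing s acc with
  | nil => simp
  | cons v r ih =>
    simp only [List.foldl_cons, ih, List.length_cons, List.range_succ_eq_map]
    simp [List.map_map, Function.comp, add_assoc, List.append_assoc]

theorem pscan_eq (r : List Int) :
    pscan r = (List.range r.length).map (fun k => (r.take (k+1)).sum) := by
  simpa using pscan_general r 0 []

theorem length_pscan (r : List Int) : (pscan r).length = r.length := by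
  simp [pscan_eq]

theorem length_rowsFn (unit : Int) (k : Nat) : (rowsFn unit k).length = (unit + 1 - 1).toNat := by
  induction k with
  | zero => simp [rowsFn, PySem.List.length_pyRange_one]
  | succ k ih => simpa [rowsFn, length_pscan] using ih

-- A's inner loop on a nonempty apt whose last row is r equals pscan r (when r has length unit).
theorem stepA_eq_pscan (unit : Int) (r : List Int) (hr : r.length = unit.toNat) :
    (PySem.List.pyRange 0 unit 1).foldl
        (fun floor j => floor ++ [(PySem.List.slice r none (some (j+1))).sum]) []
      = pscan r := by
  rw [pscan_eq, PySem.List.foldl_append_singleton_eq_map, PySem.List.pyRange_zero,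
      List.map_map, hr]
  apply List.map_congr_left
  intro k _
  have hk : (k : Int) + 1 = ((k + 1 : Nat) : Int) := by push_cast; ring
  show (PySem.List.slice r none (some ((k : Int) + 1))).sum = (r.take (k+1)).sum
  rw [hk, PySem.List.slice_to_natCast]

-- A's first row equals B's first row.
theorem firstRow_eq (unit : Int) :
    (PySem.List.pyRange 0 unit 1).foldl (fun floor j => floor ++ [j+1]) []
      = PySem.List.pyRange 1 (unit+1) 1 := by
  rw [PySem.List.foldl_append_singleton_eq_map, PySem.List.pyRange_zero,
      PySem.List.pyRange_one 1 (unit+1)]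
  simp [List.map_map, Function.comp, add_comm]

-- the body of A's outer loop
def outerA (unit : Int) (apt : List (List Int)) : List (List Int) :=
  apt ++ [(PySem.List.pyRange 0 unit 1).foldl (fun floor j =>
    if apt.isEmpty then
      floor ++ [j+1]
    else
      floor ++ [(PySem.List.slice ((PySem.List.pyGet? apt (-1)).getD []) none (some (j+1))).sum]) []]

-- A's apt after m+1 outer iterations is the list of the first m+1 rows.
theorem aptA_eq (unit : Int) (m : Nat) :
    (PySem.List.pyRange 0 ((m : Int) + 1) 1).foldl (fun apt _ => outerA unit apt) []
      = (List.range (m+1)).map (rowsFn unit) := by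
  induction m with
  | zero =>
    rw [show ((0:Nat) : Int) + 1 = 0 + 1 from by norm_num, PySem.List.pyRange_one_singleton]
    simp only [List.foldl_cons, List.foldl_nil, outerA]
    simp [firstRow_eq unit, rowsFn]
  | succ m ih =>
    rw [show ((m+1 : Nat) : Int) + 1 = ((m : Int) + 1) + 1 from by push_cast; ring,
        PySem.List.pyRange_one_succ_right (by positivity), List.foldl_append, ih]
    simp only [List.foldl_cons, List.foldl_nil]
    unfold outerA
    have hlast : (PySem.List.pyGet? ((List.range (m+1)).map (rowsFn unit)) (-1)).getD []
        = rowsFn unit m := by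
      rw [List.range_succ, List.map_append]
      simp [PySem.List.pyGet?_neg_one]
    have hempty : ((List.range (m+1)).map (rowsFn unit)).isEmpty = false := by simp
    simp only [hempty, Bool.false_eq_true, if_false, hlast]
    have hr : (rowsFn unit m).length = unit.toNat := by
      have := length_rowsFn unit m; simpa using this
    rw [stepA_eq_pscan unit _ hr, List.range_succ (n := m+1), List.map_append]
    simp [rowsFn]

-- B's outer loop applies pscan flo times.
theorem rowB_eq (unit : Int) (m : Nat) :
    (PySem.List.pyRange 0 (m : Int) 1).foldl
        (fun row _ => (row.foldl (fun (p : Int × List Int) v => (p.1 + v, p.2 ++ [p.1 + v])) (0, [])).2)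
        (PySem.List.pyRange 1 (unit+1) 1)
      = rowsFn unit m := by
  induction m with
  | zero => simp [rowsFn]
  | succ m ih =>
    rw [show ((m+1 : Nat) : Int) = (m : Int) + 1 from by push_cast; ring,
        PySem.List.pyRange_one_succ_right (a := 0) (b := (m : Int)) (by omega),
        List.foldl_append, ih]
    simp [rowsFn, pscan]

-- ===== VERDICT (by name: the statement is the Claim_ definition above) =====
theorem room_spec : Claim_equal_room := by
  intro flo unit _hdom hpre
  obtain ⟨hf, hu⟩ := hpre
  unfold Spec_room
  simp only [room, room_alt]
  obtain ⟨f, rfl⟩ : ∃ f : Nat, flo = (f : Int) := ⟨flo.toNat, (Int.toNat_of_nonneg hf).symm⟩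
  -- rewrite A's apt
  have hA := aptA_eq unit f
  have hB := rowB_eq unit f
  simp only [outerA] at hA
  rw [hA, hB]
  -- index f of the row list is rowsFn unit f
  have hget : PySem.List.pyGet? ((List.range (f+1)).map (rowsFn unit)) ((f : Nat) : Int)
      = some (rowsFn unit f) := by
    rw [PySem.List.pyGet?_natCast]
    simp
  rw [hget]
  -- both sides pick the last element of rowsFn unit f
  have hlen : (rowsFn unit f).length = unit.toNat := by
    have := length_rowsFn unit f; simpa using this
  have hne : rowsFn unit f ≠ [] := by
    intro h; rw [h] at hlen; simp at hlen; omega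
  have hA' : unit - 1 = ((unit.toNat - 1 : Nat) : Int) := by omega
  rw [hA', PySem.List.pyGet?_natCast]
  have hidx : unit.toNat - 1 < (rowsFn unit f).length := by rw [hlen]; omega
  rw [PySem.List.pyGet?_neg_one]
  simp only [List.getElem?_eq_getElem hidx, Option.getD_some,
    List.getLast?_eq_some_getLast hne]
  rw [List.getLast_eq_getElem]
  congr 1
  omega
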